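-- pv_equiv track=rewrite | github.com/sks5495/Spam-Filter-for-Hindi-Emails | SpamFilterforHindiEmails.py | purify
-- ===== SOURCE A (Python) =====
-- def purify(doc):
--     punctuations = '''!@#$£%^&*()"':-+_=“”/?><|।.,\{}[]'''
--     digits = '''1234567890०१२३४५६७८९'''
--     english = '''abcdefghijklmnopqrstuvwxyzABCCDEFGHIJKLMNOPQRSTUVWXYZ'''
--     data_no_punc = ""
--     for char in doc:
--         if(char not in punctuations and char not in digits and char not in english):
--             data_no_punc = data_no_punc + char
--     return data_no_punc
-- ===== SOURCE B (Python) =====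
-- def purify(doc):
--     punctuations = '''!@#$£%^&*()"':-+_=“”/?><|।.,\{}[]'''
--     digits = '''1234567890०१२३४५६७८९'''
--     english = '''abcdefghijklmnopqrstuvwxyzABCCDEFGHIJKLMNOPQRSTUVWXYZ'''
--     # staged deletion: one whole-string replace pass per banned character,
--     # instead of a per-character loop over doc with membership tests
--     for ch in punctuations + digits + english:
--         doc = doc.replace(ch, '')
--     return doc
-- ===== Notes on version B (the rewrite author's own statement) =====
-- stated objective: alternative
-- what changed: Instead of one pass over doc testing each character against three constant strings and concatenating survivors, B iterates over the banned character set and deletes each character from the whole document with one str.replace pass per banned character.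
import Mathlib
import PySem

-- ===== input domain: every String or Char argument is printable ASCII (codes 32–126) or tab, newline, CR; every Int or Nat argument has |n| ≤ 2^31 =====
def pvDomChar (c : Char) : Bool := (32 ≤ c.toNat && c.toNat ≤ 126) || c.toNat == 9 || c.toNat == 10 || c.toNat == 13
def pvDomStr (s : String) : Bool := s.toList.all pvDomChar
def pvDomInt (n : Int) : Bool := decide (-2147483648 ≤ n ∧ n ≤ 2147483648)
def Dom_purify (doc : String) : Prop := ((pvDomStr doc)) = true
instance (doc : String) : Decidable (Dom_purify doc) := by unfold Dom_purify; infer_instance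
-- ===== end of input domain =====

-- B replaces A's single pass over doc (three string-membership tests per character,
-- string concatenation) by staged deletion: one whole-string replace pass per banned
-- character (objective: alternative).


-- ===== PORT A =====
-- A iterates over doc, testing each character against three constant strings
-- ('char not in s' on a 1-char string = PySem.Chars.isIn [c]) and concatenating
-- the kept characters (the accumulator string kept as List Char; String.mk at the end).
def purifyPunctuations : String := "!@#$£%^&*()\"':-+_=“”/?><|।.,\\{}[]"
def purifyDigits : String := "1234567890०१२३४५६७८९"
def purifyEnglish : String := "abcdefghijklmnopqrstuvwxyzABCCDEFGHIJKLMNOPQRSTUVWXYZ"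
def purify (doc : String) : String :=
  String.mk (doc.toList.foldl
    (fun acc c =>
      if !(PySem.Chars.isIn [c] purifyPunctuations.toList)
          && !(PySem.Chars.isIn [c] purifyDigits.toList)
          && !(PySem.Chars.isIn [c] purifyEnglish.toList)
      then acc ++ [c] else acc) [])

-- ===== PORT B =====
-- B loops over the banned characters (punctuations + digits + english) and deletes
-- each one from the whole document with doc.replace(ch, '') = PySem.Chars.replace.
def purifyPunctuationsB : String := "!@#$£%^&*()\"':-+_=“”/?><|।.,\\{}[]"
def purifyDigitsB : String := "1234567890०१२३४५६७८९"
def purifyEnglishB : String := "abcdefghijklmnopqrstuvwxyzABCCDEFGHIJKLMNOPQRSTUVWXYZ"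
def purify_alt (doc : String) : String :=
  String.mk
    (((purifyPunctuationsB ++ purifyDigitsB ++ purifyEnglishB : String)).toList.foldl
      (fun s ch => PySem.Chars.replace s [ch] []) doc.toList)

-- ===== PRECONDITION & SPEC =====
def Spec_purify (doc : String) (out : String) : Prop := out = purify_alt doc
instance (doc : String) (out : String) : Decidable (Spec_purify doc out) := by unfold Spec_purify; infer_instance

-- ===== CLAIM (what is proved, stated in full; the proofs are below) =====
def Claim_equal_purify : Prop := ∀ (doc : String), Dom_purify doc → Spec_purify doc (purify doc)

-- ===== LEMMAS AND PROOFS =====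

set_option maxRecDepth 8000

-- definitional equations for PySem.Chars.replace.go
theorem purify_go_zero (old new : List Char) (l acc : List Char) :
    PySem.Chars.replace.go old new 0 l acc = acc.reverse ++ l := rfl

theorem purify_go_succ_nil (old new : List Char) (n : Nat) (acc : List Char) :
    PySem.Chars.replace.go old new (n + 1) [] acc = acc.reverse := rfl

theorem purify_go_succ_cons (old new : List Char) (n : Nat) (x : Char) (t acc : List Char) :
    PySem.Chars.replace.go old new (n + 1) (x :: t) acc
      = if old.isPrefixOf (x :: t)
        then PySem.Chars.replace.go old new n (List.drop old.length (x :: t)) (new.reverse ++ acc)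
        else PySem.Chars.replace.go old new n t (x :: acc) := rfl

-- replace.go with a single-character pattern and empty replacement is filter
theorem purify_go_single (c : Char) (fuel : Nat) (l acc : List Char)
    (h : l.length ≤ fuel) :
    PySem.Chars.replace.go [c] [] fuel l acc
      = acc.reverse ++ l.filter (fun x => x != c) := by
  induction fuel generalizing l acc with
  | zero =>
    have : l = [] := List.length_eq_zero_iff.mp (Nat.le_zero.mp h)
    subst this
    rw [purify_go_zero]
    simp
  | succ n ih =>
    cases l with
    | nil => rw [purify_go_succ_nil]; simp
    | cons x t =>
      have ht : t.length ≤ n := by simpa using h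
      by_cases hx : x = c
      · subst hx
        have hpre : List.isPrefixOf [x] (x :: t) = true := by
          simp [List.isPrefixOf]
        rw [purify_go_succ_cons, hpre, if_pos rfl]
        have : List.drop [x].length (x :: t) = t := rfl
        rw [this, List.reverse_nil, List.nil_append, ih t acc ht]
        simp
      · have hcx : (x == c) = false := beq_eq_false_iff_ne.mpr hx
        have hpre : List.isPrefixOf [c] (x :: t) = false := by
          simp [List.isPrefixOf, beq_eq_false_iff_ne.mpr (Ne.symm hx)]
        rw [purify_go_succ_cons, hpre, if_neg (by simp), ih t (x :: acc) ht]
        simp [List.filter_cons]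
        exact hx

-- s.replace(c, '') deletes exactly the occurrences of c
theorem purify_replace_single (s : List Char) (c : Char) :
    PySem.Chars.replace s [c] [] = s.filter (fun x => x != c) := by
  rw [PySem.Chars.replace, if_neg (by simp), purify_go_single c s.length s [] le_rfl,
    List.reverse_nil, List.nil_append]

-- folding single-character filters over a list = one filter against the list
theorem purify_foldl_filter (L : List Char) (s : List Char) :
    L.foldl (fun s ch => s.filter (fun x => x != ch)) s
      = s.filter (fun x => !(L.contains x)) := by
  induction L generalizing s with
  | nil =>
    rw [List.foldl_nil]
    exact (List.filter_eq_self.mpr fun x _ => rfl).symm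
  | cons c L ih =>
    rw [List.foldl_cons, ih, List.filter_filter]
    apply List.filter_congr
    intro x _
    rw [List.contains_cons, Bool.not_or, Bool.and_comm]
    rfl

-- folding single-character deletions = one filter against the banned list
theorem purify_foldl_replace (L : List Char) (s : List Char) :
    L.foldl (fun s ch => PySem.Chars.replace s [ch] []) s
      = s.filter (fun x => !(L.contains x)) := by
  have hf : (fun (s : List Char) (ch : Char) => PySem.Chars.replace s [ch] [])
      = fun s ch => s.filter (fun x => x != ch) := by
    funext s ch
    exact purify_replace_single s ch
  rw [hf, purify_foldl_filter]

-- contains distributes over append (Bool level)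
theorem purify_contains_append (c : Char) (l₁ l₂ : List Char) :
    (l₁ ++ l₂).contains c = (l₁.contains c || l₂.contains c) := by
  induction l₁ with
  | nil => simp
  | cons y l ih => simp [Bool.or_assoc]

-- the per-character tests of the two programs agree
theorem purify_keep_eq (c : Char) :
    (!(PySem.Chars.isIn [c] purifyPunctuations.toList)
      && !(PySem.Chars.isIn [c] purifyDigits.toList)
      && !(PySem.Chars.isIn [c] purifyEnglish.toList))
    = !(((purifyPunctuationsB ++ purifyDigitsB ++ purifyEnglishB : String)).toList.contains c) := by
  have hnot : ∀ s : List Char, PySem.Chars.isIn [c] s = s.contains c := by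
    intro s
    rw [Bool.eq_iff_iff, PySem.Chars.isIn_iff_infix, List.singleton_infix_iff]
    simp
  have happ : ((purifyPunctuationsB ++ purifyDigitsB ++ purifyEnglishB : String)).toList
      = purifyPunctuations.toList ++ purifyDigits.toList ++ purifyEnglish.toList := by
    simp [purifyPunctuations, purifyDigits, purifyEnglish,
      purifyPunctuationsB, purifyDigitsB, purifyEnglishB]
  rw [hnot, hnot, hnot, happ, purify_contains_append, purify_contains_append,
    Bool.not_or, Bool.not_or]

-- ===== VERDICT (by name: the statement is the Claim_ definition above) =====
theorem purify_spec : Claim_equal_purify := by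
  intro doc _
  unfold Spec_purify purify purify_alt
  rw [PySem.List.foldl_append_ite_eq_filter, List.nil_append, purify_foldl_replace]
  simp only [Bool.decide_eq_true]
  exact congrArg String.mk (List.filter_congr (fun c _ => purify_keep_eq c))
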